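-- pv_equiv track=rewrite | github.com/pypi-data/pypi-mirror-379 | packages/wujing/wujing-3.8.2-py3-none-any.whl/wujing/rag/markdown.py | _extract_document_title
-- ===== SOURCE A (Python) =====
-- from typing import List, Optional
--
-- def _extract_document_title(markdown_text: str) -> Optional[str]:
--     """
--     从 Markdown 文本中提取文档标题
--
--     策略:
--     1. 提取第一个标题（任意级别：#、##、###、####、#####、######）
--     2. 排除代码块中的内容
--     3. 返回找到的第一个标题，如果没有找到则返回 None
--
--     Args:
--         markdown_text: Markdown 文本内容
--
--     Returns:
--         文档标题，如果没有找到则返回 None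
--     """
--     if not markdown_text.strip():
--         return None
--
--     # 简单的 Markdown 解析：排除代码块中的内容
--     lines = markdown_text.strip().split('\n')
--     in_code_block = False
--
--     for line in lines:
--         stripped_line = line.strip()
--
--         # 检查代码块标记
--         if stripped_line.startswith('```'):
--             in_code_block = not in_code_block
--             continue
--
--         # 如果在代码块中，跳过这行
--         if in_code_block:
--             continue
--
--         # 检查是否为标题（任意级别）
--         if stripped_line.startswith('#') and len(stripped_line) > 1:
--             # 计算标题级别（#的数量）
--             level = 0
--             for char in stripped_line:
--                 if char == '#':
--                     level += 1
--                 else: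
--                     break
--
--             # 标题级别应该在1-6之间，且#后面应该有空格或内容
--             if 1 <= level <= 6 and len(stripped_line) > level:
--                 # 提取标题内容（去掉#和可能的空格）
--                 title_content = stripped_line[level:].strip()
--                 if title_content:
--                     return title_content
--
--     return None
-- ===== SOURCE B (Python) =====
-- from typing import Optional
--
-- def _extract_document_title(markdown_text: str) -> Optional[str]:
--     """Stateless pipeline: partition lines into fence-delimited segments,
--     keep the even-indexed segments (outside code blocks), then pick the
--     first line whose leading run of hash marks (measured via lstrip) has length 1-6
--     and whose remainder is non-empty after stripping."""
--     text = markdown_text.strip()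
--     if not text:
--         return None
--
--     # pass 1: split the stripped lines into segments at ``` fence lines
--     segments = [[]]
--     for raw in text.split('\n'):
--         line = raw.strip()
--         if line.startswith('```'):
--             segments.append([])
--         else:
--             segments[-1].append(line)
--
--     # pass 2: flatten every other segment (those outside code blocks)
--     visible = []
--     segs = segments
--     while segs:
--         visible += segs[0]
--         segs = segs[2:]
--
--     # pass 3: first line with a leading hash-run of length 1-6 and a non-empty title
--     return next(
--         (line.lstrip('#').strip()
--          for line in visible
--          if 1 <= len(line) - len(line.lstrip('#')) <= 6 and line.lstrip('#').strip()),
--         None,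
--     )
-- ===== Notes on version B (the rewrite author's own statement) =====
-- stated objective: alternative
-- what changed: B replaces A's stateful single loop (an in-code flag toggled per line, a manual hash-counting inner loop with break, nested slice conditions) by a stateless three-stage pipeline: partition the stripped lines into fence-delimited segments, flatten every other segment (the ones outside code blocks, selected by position instead of a flag), and take the first line whose leading run of hash marks, measured by lstrip-length arithmetic, has length 1-6 with a non-empty stripped remainder.
import Mathlib
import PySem

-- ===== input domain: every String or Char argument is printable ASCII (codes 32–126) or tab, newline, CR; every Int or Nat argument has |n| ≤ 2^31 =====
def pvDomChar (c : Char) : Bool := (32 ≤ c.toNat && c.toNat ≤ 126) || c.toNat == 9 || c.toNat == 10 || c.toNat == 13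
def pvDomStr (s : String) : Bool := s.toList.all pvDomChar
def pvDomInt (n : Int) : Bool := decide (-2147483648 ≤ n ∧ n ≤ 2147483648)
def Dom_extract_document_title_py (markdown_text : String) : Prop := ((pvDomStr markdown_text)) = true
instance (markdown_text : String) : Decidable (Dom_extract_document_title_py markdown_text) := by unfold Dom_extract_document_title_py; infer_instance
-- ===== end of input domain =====

-- B replaces A's flag-toggling loop by a stateless pipeline (fence-delimited segments, every other one kept, first valid heading); alternative decomposition, same cost.

-- ===== PORT A =====
-- the `for char in stripped_line: if char == '#': level += 1 else: break` loop
def pvLevelA : List Char → Int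
  | [] => 0
  | c :: cs => if c = '#' then 1 + pvLevelA cs else 0

-- A's single `for line in lines` loop carrying the in_code_block flag (lines as char lists)
def pvLoopA : List (List Char) → Bool → Option String
  | [], _ => none
  | line :: rest, inCode =>
    if PySem.Chars.startswith (PySem.Chars.strip line) ['`', '`', '`'] then pvLoopA rest (!inCode)
    else if inCode then pvLoopA rest inCode
    else if PySem.Chars.startswith (PySem.Chars.strip line) ['#'] = true ∧ 1 < (PySem.Chars.strip line).length then
      if 1 ≤ pvLevelA (PySem.Chars.strip line) ∧ pvLevelA (PySem.Chars.strip line) ≤ 6 ∧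
          pvLevelA (PySem.Chars.strip line) < ((PySem.Chars.strip line).length : Int) then
        if PySem.Chars.strip (PySem.List.slice (PySem.Chars.strip line) (some (pvLevelA (PySem.Chars.strip line))) none) ≠ [] then
          some (String.ofList (PySem.Chars.strip (PySem.List.slice (PySem.Chars.strip line) (some (pvLevelA (PySem.Chars.strip line))) none)))
        else pvLoopA rest inCode
      else pvLoopA rest inCode
    else pvLoopA rest inCode

def extract_document_title_py (markdown_text : String) : Option String :=
  if PySem.Chars.strip markdown_text.toList = [] then none
  else pvLoopA (PySem.Chars.splitOn (PySem.Chars.strip markdown_text.toList) ['\n']) false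

-- ===== PORT B =====
-- pass 1: `segments=[[]]; for raw in lines: line=raw.strip(); fence -> new segment, else append to last`
def pvSegs : List (List Char) → List (List (List Char))
  | [] => [[]]
  | raw :: rest =>
    if PySem.Chars.startswith (PySem.Chars.strip raw) ['`', '`', '`'] then [] :: pvSegs rest
    else match pvSegs rest with
      | s :: ss => (PySem.Chars.strip raw :: s) :: ss
      | [] => [[PySem.Chars.strip raw]]

-- pass 2: `while segs: visible += segs[0]; segs = segs[2:]` — flatten every other segment
def pvEvery2 : List (List (List Char)) → List (List Char)
  | [] => []
  | [s] => s
  | s :: _ :: ss => s ++ pvEvery2 ss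

-- pass 3 filter: `1 <= len(line) - len(line.lstrip('#')) <= 6 and line.lstrip('#').strip()`
-- (lstrip('#') is dropWhile (== '#'): exact, the strip set is the single char '#')
def pvIsTitle (line : List Char) : Bool :=
  decide ((1 : Int) ≤ (line.length : Int) - ((line.dropWhile (· == '#')).length : Int)
      ∧ (line.length : Int) - ((line.dropWhile (· == '#')).length : Int) ≤ 6)
  && decide (PySem.Chars.strip (line.dropWhile (· == '#')) ≠ [])

def pvTitleOf (line : List Char) : String :=
  String.ofList (PySem.Chars.strip (line.dropWhile (· == '#')))

def extract_document_title_py_alt (markdown_text : String) : Option String :=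
  if PySem.Chars.strip markdown_text.toList = [] then none
  else
    ((pvEvery2 (pvSegs (PySem.Chars.splitOn (PySem.Chars.strip markdown_text.toList) ['\n']))).find?
        pvIsTitle).map pvTitleOf

-- ===== PRECONDITION & SPEC =====
def Spec_extract_document_title_py (markdown_text : String) (out : Option String) : Prop := out = extract_document_title_py_alt markdown_text
instance (markdown_text : String) (out : Option String) : Decidable (Spec_extract_document_title_py markdown_text out) := by unfold Spec_extract_document_title_py; infer_instance

-- ===== CLAIM (what is proved, stated in full; the proofs are below) =====
def Claim_equal_extract_document_title_py : Prop := ∀ (markdown_text : String), Dom_extract_document_title_py markdown_text → Spec_extract_document_title_py markdown_text (extract_document_title_py markdown_text)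

-- ===== LEMMAS AND PROOFS =====
theorem pvLevelA_eq (cs : List Char) : pvLevelA cs = ((cs.takeWhile (· == '#')).length : Int) := by
  induction cs with
  | nil => simp [pvLevelA]
  | cons c cs ih =>
    by_cases h : c = '#' <;> simp [pvLevelA, h, ih]; omega

theorem pvDrop_takeWhile (cs : List Char) (p : Char → Bool) :
    cs.drop (cs.takeWhile p).length = cs.dropWhile p := by
  induction cs with
  | nil => simp
  | cons c cs ih =>
    by_cases h : p c <;> simp [h, ih]

theorem pvStartswith_hash (s : List Char) :
    PySem.Chars.startswith s ['#'] = true ↔ 1 ≤ (s.takeWhile (· == '#')).length := by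
  rw [PySem.Chars.startswith_iff]
  constructor
  · rintro ⟨t, ht⟩
    have : s = '#' :: t := ht.symm
    simp [this]
  · intro h1
    cases hcs : s with
    | nil => rw [hcs] at h1; simp at h1
    | cons c cs =>
      by_cases hch : c = '#'
      · subst hch; exact ⟨cs, rfl⟩
      · exfalso; rw [hcs] at h1; simp [hch] at h1

theorem pvSegs_ne_nil (lines : List (List Char)) : pvSegs lines ≠ [] := by
  cases lines with
  | nil => simp [pvSegs]
  | cons l rest =>
    simp only [pvSegs]
    split
    · simp
    · split <;> simp

theorem pvEvery2_cons (s : List (List Char)) (ss : List (List (List Char))) :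
    pvEvery2 (s :: ss) = s ++ pvEvery2 (ss.drop 1) := by
  cases ss <;> simp [pvEvery2]

theorem pvLoopA_eq (lines : List (List Char)) (inCode : Bool) :
    pvLoopA lines inCode =
      ((pvEvery2 ((pvSegs lines).drop (if inCode then 1 else 0))).find? pvIsTitle).map pvTitleOf := by
  induction lines generalizing inCode with
  | nil => cases inCode <;> simp [pvLoopA, pvSegs, pvEvery2]
  | cons line rest ih =>
    simp only [pvLoopA, pvSegs]
    by_cases hf : PySem.Chars.startswith (PySem.Chars.strip line) ['`', '`', '`'] = true
    · rw [if_pos hf, if_pos hf, ih]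
      cases inCode with
      | false => simp [pvEvery2_cons]
      | true => simp
    · rw [if_neg hf, if_neg hf]
      obtain ⟨s, ss, hseg⟩ : ∃ s ss, pvSegs rest = s :: ss := by
        cases h : pvSegs rest with
        | nil => exact absurd h (pvSegs_ne_nil rest)
        | cons a b => exact ⟨a, b, rfl⟩
      rw [hseg]
      cases inCode with
      | true =>
        simp only [if_true, List.drop_succ_cons, List.drop_zero]
        rw [ih true, hseg]; simp
      | false =>
        simp only [Bool.false_eq_true, if_false, List.drop_zero]
        have hfind : pvEvery2 ((PySem.Chars.strip line :: s) :: ss) =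
            PySem.Chars.strip line :: pvEvery2 (s :: ss) := by
          rw [pvEvery2_cons, pvEvery2_cons]; simp
        rw [hfind]
        generalize PySem.Chars.strip line = t
        set H := (t.takeWhile (· == '#')).length with hH
        have hsplit : (t.takeWhile (· == '#')).length + (t.dropWhile (· == '#')).length
            = t.length := by
          rw [← List.length_append, List.takeWhile_append_dropWhile]
        rw [pvLevelA_eq t, ← hH]
        have hslice : PySem.List.slice t (some (H : Int)) none = t.dropWhile (· == '#') := by
          rw [PySem.List.slice_from_natCast, pvDrop_takeWhile]
        have hIH := ih false
        rw [hseg] at hIH; simp only [Bool.false_eq_true, if_false, List.drop_zero] at hIH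
        by_cases hT : pvIsTitle t = true
        · -- B accepts t; show A returns the same title
          have ⟨hnum, hne⟩ : ((1 : Int) ≤ (t.length : Int) - ((t.dropWhile (· == '#')).length : Int)
              ∧ (t.length : Int) - ((t.dropWhile (· == '#')).length : Int) ≤ 6)
              ∧ PySem.Chars.strip (t.dropWhile (· == '#')) ≠ [] := by
            simpa [pvIsTitle] using hT
          have hHval : (t.length : Int) - ((t.dropWhile (· == '#')).length : Int) = (H : Int) := by
            omega
          rw [hHval] at hnum
          have hdropne : t.dropWhile (· == '#') ≠ [] := by
            intro h; rw [h] at hne; exact hne (by decide)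
          have hdroplen : 1 ≤ (t.dropWhile (· == '#')).length :=
            List.length_pos_iff.mpr hdropne
          have hA1 : PySem.Chars.startswith t ['#'] = true ∧ 1 < t.length := by
            refine ⟨(pvStartswith_hash t).mpr (by exact_mod_cast hnum.1), by omega⟩
          have hA2 : 1 ≤ (H : Int) ∧ (H : Int) ≤ 6 ∧ (H : Int) < (t.length : Int) := by
            refine ⟨hnum.1, hnum.2, ?_⟩; omega
          rw [if_pos hA1, if_pos hA2, hslice, if_pos hne,
            List.find?_cons_of_pos hT, Option.map_some]
          rfl
        · -- B rejects t; show A continues with the rest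
          rw [List.find?_cons_of_neg (by simpa using hT), ← hIH]
          have hHval : (t.length : Int) - ((t.dropWhile (· == '#')).length : Int) = (H : Int) := by
            omega
          have hTfalse : ¬ (((1 : Int) ≤ (H : Int) ∧ (H : Int) ≤ 6)
              ∧ PySem.Chars.strip (t.dropWhile (· == '#')) ≠ []) := by
            intro ⟨ha, hb⟩; apply hT
            simp only [pvIsTitle, hHval]
            simp [ha.1, ha.2, hb]
          by_cases hA1 : PySem.Chars.startswith t ['#'] = true ∧ 1 < t.length
          · have h1H : 1 ≤ H := (pvStartswith_hash t).mp hA1.1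
            by_cases hA2 : 1 ≤ (H : Int) ∧ (H : Int) ≤ 6 ∧ (H : Int) < (t.length : Int)
            · have hstr : ¬ PySem.Chars.strip (t.dropWhile (· == '#')) ≠ [] := by
                intro hne; exact hTfalse ⟨⟨hA2.1, hA2.2.1⟩, hne⟩
              rw [if_pos hA1, if_pos hA2, hslice, if_neg hstr]
            · by_cases h6 : (H : Int) ≤ 6
              · -- then H = t.length, so dropWhile = [] and strip = []
                have hHlen : H = t.length := by
                  have : ¬ (H : Int) < (t.length : Int) := fun hlt =>
                    hA2 ⟨by exact_mod_cast h1H, h6, hlt⟩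
                  have hle : (t.takeWhile (· == '#')).length ≤ t.length :=
                    (List.takeWhile_prefix (p := (· == '#')) (l := t)).length_le
                  omega
                have hdrop : t.dropWhile (· == '#') = [] := by
                  have := hsplit; rw [← hH] at this
                  exact List.eq_nil_of_length_eq_zero (by omega)
                rw [if_pos hA1, if_neg hA2]
              · rw [if_pos hA1, if_neg hA2]
          · rw [if_neg hA1]

-- ===== VERDICT (by name: the statement is the Claim_ definition above) =====
theorem extract_document_title_py_spec : Claim_equal_extract_document_title_py := by
  intro markdown_text _
  unfold Spec_extract_document_title_py extract_document_title_py extract_document_title_py_alt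
  split
  · rfl
  · rw [pvLoopA_eq]; rfl
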